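-- pv_equiv track=rewrite | github.com/Jamire44/Leetcode_Practice | neet/test.py | solution
-- ===== SOURCE A (Python) =====
-- def solution(numbers):
--     # a < b > c
--     # a < b
--     # b > c
--
--     # a > b < c
--     # a > b
--     # b < c
--     final_arr = []
--     l, m, r = 0, 1, 2
--
--     while(r <= len(numbers)-1):
--         if numbers[l] < numbers[m] and numbers[m] > numbers[r]:
--             final_arr.append(1)
--         elif numbers[l] > numbers[m] and numbers[m] < numbers[r]:
--             final_arr.append(1)
--         else:
--             final_arr.append(0)
--
--         l+=1
--         m+=1
--         r+=1
--
--     return final_arr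
-- ===== SOURCE B (Python) =====
-- def solution(numbers):
--     # Two-pass decomposition: compute consecutive-pair direction signs,
--     # then mark 1 where adjacent signs are strictly opposite.
--     signs = []
--     for i in range(len(numbers) - 1):
--         d = numbers[i + 1] - numbers[i]
--         signs.append(1 if d > 0 else (-1 if d < 0 else 0))
--     return [1 if signs[i] * signs[i + 1] < 0 else 0 for i in range(len(signs) - 1)]
-- ===== Notes on version B (the rewrite author's own statement) =====
-- stated objective: alternative
-- what changed: Replaced the single sliding three-index window with two passes: first a consecutive-difference sign array, then a scan marking strictly opposite adjacent signs.
import Mathlib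
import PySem

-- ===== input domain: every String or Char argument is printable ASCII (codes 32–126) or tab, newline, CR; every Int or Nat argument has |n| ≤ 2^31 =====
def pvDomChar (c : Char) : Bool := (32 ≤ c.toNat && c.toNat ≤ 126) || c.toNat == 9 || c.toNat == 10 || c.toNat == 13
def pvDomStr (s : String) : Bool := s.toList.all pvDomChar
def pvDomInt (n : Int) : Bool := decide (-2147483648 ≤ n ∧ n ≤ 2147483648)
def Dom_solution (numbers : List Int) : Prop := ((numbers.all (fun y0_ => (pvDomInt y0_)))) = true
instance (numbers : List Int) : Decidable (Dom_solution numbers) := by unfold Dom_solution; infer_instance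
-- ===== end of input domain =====

-- B replaces A's single three-index sliding window with two passes (a consecutive-difference
-- sign list, then a strictly-opposite-adjacent-signs scan); objective: alternative decomposition.


-- ===== PORT A =====
-- A's while loop over indices l, m=l+1, r=l+2; the loop guard keeps all three indices in
-- range, so `getD _ 0` is exact Python indexing here.
def solutionGo (numbers : List Int) (l : Nat) (acc : List Int) : List Int :=
  if l + 2 < numbers.length then
    let a := numbers.getD l 0
    let b := numbers.getD (l + 1) 0
    let c := numbers.getD (l + 2) 0
    solutionGo numbers (l + 1)
      (acc ++ [if (a < b ∧ b > c) ∨ (a > b ∧ b < c) then (1 : Int) else 0])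
  else acc
termination_by numbers.length - l

def solution (numbers : List Int) : List Int :=
  solutionGo numbers 0 []

-- ===== PORT B =====
-- pass 1 of Source B: direction sign of each consecutive pair
def signsOf : List Int → List Int
  | a :: b :: rest =>
      (if b - a > 0 then (1 : Int) else if b - a < 0 then -1 else 0) :: signsOf (b :: rest)
  | _ => []

-- pass 2 of Source B: 1 where adjacent signs are strictly opposite
def detect : List Int → List Int
  | s :: t :: rest => (if s * t < 0 then (1 : Int) else 0) :: detect (t :: rest)
  | _ => []

def solution_alt (numbers : List Int) : List Int :=
  detect (signsOf numbers)

-- ===== PRECONDITION & SPEC =====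
def Spec_solution (numbers : List Int) (out : List Int) : Prop := out = solution_alt numbers
instance (numbers : List Int) (out : List Int) : Decidable (Spec_solution numbers out) := by unfold Spec_solution; infer_instance

-- ===== CLAIM (what is proved, stated in full; the proofs are below) =====
def Claim_equal_solution : Prop := ∀ (numbers : List Int), Dom_solution numbers → Spec_solution numbers (solution numbers)

-- ===== LEMMAS AND PROOFS =====

theorem detect_short (s : List Int) (h : s.length ≤ 1) : detect s = [] := by
  match s with
  | [] => rfl
  | [_] => rfl
  | _ :: _ :: _ => simp at h

theorem signsOf_length (s : List Int) : (signsOf s).length = s.length - 1 := by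
  match s with
  | [] => rfl
  | [_] => rfl
  | a :: b :: rest => simp [signsOf, signsOf_length (b :: rest)]
termination_by s.length

theorem sign_mul_lt (a b c : Int) :
    ((if b - a > 0 then (1 : Int) else if b - a < 0 then -1 else 0) *
      (if c - b > 0 then (1 : Int) else if c - b < 0 then -1 else 0) < 0)
    ↔ ((a < b ∧ b > c) ∨ (a > b ∧ b < c)) := by
  split_ifs <;> constructor <;> intro h <;> omega

theorem solutionGo_eq (numbers : List Int) (l : Nat) (acc : List Int) :
    solutionGo numbers l acc = acc ++ detect (signsOf (numbers.drop l)) := by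
  by_cases h : l + 2 < numbers.length
  · have h0 : l < numbers.length := by omega
    have h1 : l + 1 < numbers.length := by omega
    have d0 : numbers.drop l = numbers[l] :: numbers.drop (l + 1) :=
      List.drop_eq_getElem_cons h0
    have d1 : numbers.drop (l + 1) = numbers[l + 1] :: numbers.drop (l + 2) :=
      List.drop_eq_getElem_cons h1
    have d2 : numbers.drop (l + 2) = numbers[l + 2] :: numbers.drop (l + 3) :=
      List.drop_eq_getElem_cons h
    rw [solutionGo]
    simp only [h, if_pos]
    rw [solutionGo_eq numbers (l + 1)]
    rw [d0, d1, d2]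
    simp only [signsOf, detect]
    have g0 : numbers.getD l 0 = numbers[l] := List.getD_eq_getElem _ _ h0
    have g1 : numbers.getD (l + 1) 0 = numbers[l + 1] := List.getD_eq_getElem _ _ h1
    have g2 : numbers.getD (l + 2) 0 = numbers[l + 2] := List.getD_eq_getElem _ _ h
    simp only [g0, g1, g2]
    rw [List.append_assoc]
    congr 1
    simp only [List.singleton_append]
    have := sign_mul_lt numbers[l] numbers[l+1] numbers[l+2]
    by_cases hc : (numbers[l] < numbers[l+1] ∧ numbers[l+1] > numbers[l+2]) ∨
        (numbers[l] > numbers[l+1] ∧ numbers[l+1] < numbers[l+2])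
    · rw [if_pos hc, if_pos (this.mpr hc)]
    · rw [if_neg hc, if_neg (fun hlt => hc (this.mp hlt))]
  · rw [solutionGo]
    simp only [h, if_false]
    have hlen : (numbers.drop l).length ≤ 2 := by
      simp [List.length_drop]; omega
    rw [detect_short _ (by rw [signsOf_length]; omega), List.append_nil]
termination_by numbers.length - l

-- ===== VERDICT (by name: the statement is the Claim_ definition above) =====
theorem solution_spec : Claim_equal_solution := by
  intro numbers _
  unfold Spec_solution solution solution_alt
  rw [solutionGo_eq]
  simp
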